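-- pv_equiv track=rewrite | github.com/AmorErwanc/prompts | 提示词/故事线商业化提示词/用户数据 150-250轮/Python处理脚本/分段切分脚本.py | create_dialog_segments_v2
-- ===== SOURCE A (Python) =====
-- def create_dialog_segments_v2(conversation, segment_size=50):
--     """
--     改进的对话分段方法，更准确地按轮次分段
--
--     Args:
--         conversation: 完整对话列表
--         segment_size: 每段的轮次数
--
--     Returns:
--         list: 分段后的对话列表
--     """
--     segments = []
--     current_segment = []
--     current_round = 0
--
--     i = 0
--     while i < len(conversation):
--         msg = conversation[i]
--         current_segment.append(msg)
--
--         # 如果当前是user消息，检查下一个是否是assistant消息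
--         if msg.get('role') == 'user' and i + 1 < len(conversation):
--             next_msg = conversation[i + 1]
--             if next_msg.get('role') == 'assistant':
--                 current_segment.append(next_msg)
--                 current_round += 1
--                 i += 2  # 跳过下一个消息，因为已经处理了
--
--                 # 检查是否需要开始新分段
--                 if current_round >= segment_size:
--                     segments.append(current_segment.copy())
--                     current_segment = []
--                     current_round = 0
--             else:
--                 i += 1
--         else:
--             i += 1
--
--     # 添加最后一段（如果有剩余）
--     if current_segment:
--         segments.append(current_segment)
--
--     return segments
-- ===== SOURCE B (Python) =====
-- def create_dialog_segments_v2(conversation, segment_size=50):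
--     # Pass 1: pair each user message with an immediately following assistant
--     # message into a round-flagged unit; everything else is a single unit.
--     units = []
--     i = 0
--     n = len(conversation)
--     while i < n:
--         msg = conversation[i]
--         if (msg.get('role') == 'user' and i + 1 < n
--                 and conversation[i + 1].get('role') == 'assistant'):
--             units.append(([msg, conversation[i + 1]], True))
--             i += 2
--         else:
--             units.append(([msg], False))
--             i += 1
--     # Pass 2: group units, flushing after every segment_size completed rounds.
--     segments = []
--     current = []
--     rounds = 0
--     for msgs, is_round in units:
--         current.extend(msgs)
--         if is_round:
--             rounds += 1
--             if rounds >= segment_size: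
--                 segments.append(current)
--                 current = []
--                 rounds = 0
--     if current:
--         segments.append(current)
--     return segments
-- ===== Notes on version B (the rewrite author's own statement) =====
-- stated objective: alternative
-- what changed: Replaces A's single index-driven while loop that interleaves pairing and grouping with a two-pass decomposition: first a scan that builds round-flagged units (user+assistant pairs vs singletons), then a fold over those units that accumulates segments and flushes on the round counter.
import Mathlib
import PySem

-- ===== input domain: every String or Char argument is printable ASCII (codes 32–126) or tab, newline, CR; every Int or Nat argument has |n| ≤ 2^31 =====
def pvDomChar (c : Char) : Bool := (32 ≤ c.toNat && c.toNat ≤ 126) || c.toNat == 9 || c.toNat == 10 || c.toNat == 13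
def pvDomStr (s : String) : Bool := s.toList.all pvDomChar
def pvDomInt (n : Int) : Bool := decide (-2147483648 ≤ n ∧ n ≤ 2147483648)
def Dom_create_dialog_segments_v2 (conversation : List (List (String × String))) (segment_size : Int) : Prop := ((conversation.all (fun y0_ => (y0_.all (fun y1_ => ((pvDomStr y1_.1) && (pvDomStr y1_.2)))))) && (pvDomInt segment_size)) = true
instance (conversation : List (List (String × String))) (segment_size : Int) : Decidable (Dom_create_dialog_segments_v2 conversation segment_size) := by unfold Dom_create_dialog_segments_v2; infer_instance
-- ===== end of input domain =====

-- B replaces A's single index-driven loop by a two-pass decomposition (pairing scan, then grouping fold); same cost, alternative structure.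

-- msg.get('role'): first-match association-list lookup (shared by both ports)
def pvRole (m : List (String × String)) : Option String :=
  PySem.Dict.get? (PySem.Dict.mk m) "role"

-- ===== PORT A =====
-- A's while loop over index i, transcribed as recursion on the remaining list
-- (the loop only reads conversation[i] and conversation[i+1] and advances by 1 or 2).
def aLoop (size : Int) : List (List (String × String)) → List (List (String × String)) →
    Int → List (List (List (String × String))) → List (List (List (String × String)))
  | [], cur, _, segs => if cur ≠ [] then segs ++ [cur] else segs
  -- i+1 < len(conversation) is false: the user-branch guard fails, so i += 1
  | [m], cur, round, segs => aLoop size [] (cur ++ [m]) round segs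
  | m :: n :: rest', cur, round, segs =>
    let cur1 := cur ++ [m]
    if pvRole m = some "user" then
      if pvRole n = some "assistant" then
        let cur2 := cur1 ++ [n]
        let round' := round + 1
        if round' ≥ size then
          aLoop size rest' [] 0 (segs ++ [cur2])
        else
          aLoop size rest' cur2 round' segs
      else aLoop size (n :: rest') cur1 round segs
    else aLoop size (n :: rest') cur1 round segs

def create_dialog_segments_v2 (conversation : List (List (String × String))) (segment_size : Int) : List (List (List (String × String))) :=
  aLoop segment_size conversation [] 0 []

-- ===== PORT B =====
-- Pass 1 of Source B: round-flagged units
def bUnits : List (List (String × String)) → List (List (List (String × String)) × Bool)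
  | [] => []
  | [m] => [([m], false)]
  | m :: n :: rest =>
    if pvRole m = some "user" ∧ pvRole n = some "assistant" then
      ([m, n], true) :: bUnits rest
    else
      ([m], false) :: bUnits (n :: rest)

-- Pass 2 of Source B: grouping fold over the units
def bFold (size : Int) : List (List (List (String × String)) × Bool) →
    List (List (String × String)) → Int → List (List (List (String × String))) →
    List (List (List (String × String)))
  | [], cur, _, segs => if cur ≠ [] then segs ++ [cur] else segs
  | (msgs, isRound) :: us, cur, round, segs =>
    let cur' := cur ++ msgs
    if isRound then
      let round' := round + 1
      if round' ≥ size then bFold size us [] 0 (segs ++ [cur'])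
      else bFold size us cur' round' segs
    else bFold size us cur' round segs

def create_dialog_segments_v2_alt (conversation : List (List (String × String))) (segment_size : Int) : List (List (List (String × String))) :=
  bFold segment_size (bUnits conversation) [] 0 []

-- ===== PRECONDITION & SPEC =====
def Spec_create_dialog_segments_v2 (conversation : List (List (String × String))) (segment_size : Int) (out : List (List (List (String × String)))) : Prop := out = create_dialog_segments_v2_alt conversation segment_size
instance (conversation : List (List (String × String))) (segment_size : Int) (out : List (List (List (String × String)))) : Decidable (Spec_create_dialog_segments_v2 conversation segment_size out) := by unfold Spec_create_dialog_segments_v2; infer_instance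

-- ===== CLAIM (what is proved, stated in full; the proofs are below) =====
def Claim_equal_create_dialog_segments_v2 : Prop := ∀ (conversation : List (List (String × String))) (segment_size : Int), Dom_create_dialog_segments_v2 conversation segment_size → Spec_create_dialog_segments_v2 conversation segment_size (create_dialog_segments_v2 conversation segment_size)

-- ===== LEMMAS AND PROOFS =====
-- Invariant: A's loop on the remaining list equals B's fold over the units of that list,
-- for every loop state (current segment, round counter, emitted segments).
theorem aLoop_eq_bFold_bUnits (size : Int) (rest : List (List (String × String))) :
    ∀ cur round segs, aLoop size rest cur round segs = bFold size (bUnits rest) cur round segs := by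
  induction rest using bUnits.induct with
  | case1 =>
    intro cur round segs
    simp only [aLoop, bUnits, bFold]
  | case2 m =>
    intro cur round segs
    simp [aLoop, bUnits, bFold]
  | case3 m n rest' hc ih =>
    intro cur round segs
    obtain ⟨hm, hn⟩ := hc
    simp only [aLoop, bUnits, bFold, if_pos hm, if_pos hn, if_pos (And.intro hm hn)]
    by_cases hs : round + 1 ≥ size
    · simp [if_pos hs, ih, List.append_assoc]
    · simp [if_neg hs, ih, List.append_assoc]
  | case4 m n rest' hc ih =>
    intro cur round segs
    simp only [bUnits, if_neg hc, bFold, Bool.false_eq_true, if_false]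
    by_cases hm : pvRole m = some "user"
    · have hn : ¬ pvRole n = some "assistant" := fun h => hc ⟨hm, h⟩
      simp only [aLoop, if_pos hm, if_neg hn, ih]
    · simp only [aLoop, if_neg hm, ih]

-- ===== VERDICT (by name: the statement is the Claim_ definition above) =====
theorem create_dialog_segments_v2_spec : Claim_equal_create_dialog_segments_v2 := by
  intro conversation segment_size _
  unfold Spec_create_dialog_segments_v2 create_dialog_segments_v2 create_dialog_segments_v2_alt
  exact aLoop_eq_bFold_bUnits segment_size conversation [] 0 []
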